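-- pv_equiv track=rewrite | github.com/cbohnert67/50_DAYS_OF_PYTHON | day9_zeros_last.py | zeros_last
-- ===== SOURCE A (Python) =====
-- def zeros_last(numbers):
--     if type(numbers) is not list:
--         return "Invalid input."
--     if len(numbers) == 0:
--         return []
--     zeros = [number for number in numbers if number == 0]
--     if len(zeros) == 0:
--         return sorted(numbers)
--     return [number for number in numbers if number != 0] + zeros
-- ===== SOURCE B (Python) =====
-- def zeros_last(numbers):
--     if type(numbers) is not list:
--         return "Invalid input."
--     if 0 not in numbers:
--         return sorted(numbers)
--     return sorted(numbers, key=lambda x: x == 0)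
-- ===== Notes on version B (the rewrite author's own statement) =====
-- stated objective: idiomatic
-- what changed: Replaces the two filtering comprehensions plus concatenation (and the explicit empty/zero-count checks) with a membership test and a single stable key-sort that moves zeros to the end.
import Mathlib
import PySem

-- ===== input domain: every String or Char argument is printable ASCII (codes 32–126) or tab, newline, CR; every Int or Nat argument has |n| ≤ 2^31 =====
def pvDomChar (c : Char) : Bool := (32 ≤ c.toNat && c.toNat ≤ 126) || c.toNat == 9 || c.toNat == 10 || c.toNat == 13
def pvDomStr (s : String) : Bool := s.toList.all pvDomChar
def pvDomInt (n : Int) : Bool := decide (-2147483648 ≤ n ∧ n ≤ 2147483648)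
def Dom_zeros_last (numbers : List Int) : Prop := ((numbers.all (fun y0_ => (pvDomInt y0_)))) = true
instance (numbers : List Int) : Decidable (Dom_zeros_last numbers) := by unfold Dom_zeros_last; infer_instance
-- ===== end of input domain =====

-- B replaces the two comprehensions + concatenation with a membership test and one stable key-sort (same values; no speed claim).
-- ===== PORT A =====
def zeros_last (numbers : List Int) : List Int :=
  if numbers.length = 0 then []
  else
    let zeros := numbers.filter (fun number => number == 0)
    if zeros.length = 0 then PySem.List.sorted numbers (fun x => x) false
    else numbers.filter (fun number => number != 0) ++ zeros

-- ===== PORT B =====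
def zeros_last_alt (numbers : List Int) : List Int :=
  if !numbers.contains 0 then PySem.List.sorted numbers (fun x => x) false
  else PySem.List.sorted numbers (fun x => decide (x = 0)) false

-- ===== PRECONDITION & SPEC =====
def Spec_zeros_last (numbers : List Int) (out : List Int) : Prop := out = zeros_last_alt numbers
instance (numbers : List Int) (out : List Int) : Decidable (Spec_zeros_last numbers out) := by unfold Spec_zeros_last; infer_instance

-- ===== CLAIM (what is proved, stated in full; the proofs are below) =====
def Claim_equal_zeros_last : Prop := ∀ (numbers : List Int), Dom_zeros_last numbers → Spec_zeros_last numbers (zeros_last numbers)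

-- ===== LEMMAS AND PROOFS =====

-- ===== VERDICT (by name: the statement is the Claim_ definition above) =====
-- inserting a key-false element skips the key-false prefix and lands just before the key-true block
lemma insertBy_mid {α : Type} (before : α → α → Bool) (x t : α) (F ts : List α)
    (hF : ∀ y ∈ F, before x y = false) (ht : before x t = true) :
    PySem.List.insertBy before x (F ++ t :: ts) = F ++ x :: t :: ts := by
  induction F with
  | nil => simp [PySem.List.insertBy, ht]
  | cons f F ih =>
    have hf : before x f = false := hF f (by simp)
    simp only [List.cons_append, PySem.List.insertBy, hf]
    simp [ih (fun y hy => hF y (by simp [hy]))]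

-- loop invariant: the insertion-sort fold with a Bool key maintains "key-false block ++ key-true block"
lemma foldl_insertBy_bool_key {α : Type} (key : α → Bool) (l F T : List α)
    (hF : ∀ y ∈ F, key y = false) (hT : ∀ y ∈ T, key y = true) :
    l.foldl (fun acc x => PySem.List.insertBy (fun a b => decide (key a < key b)) x acc) (F ++ T)
      = (F ++ l.filter (fun x => !key x)) ++ (T ++ l.filter key) := by
  induction l generalizing F T with
  | nil => simp
  | cons x l ih =>
    simp only [List.foldl_cons]
    by_cases hx : key x = true
    · have hins : PySem.List.insertBy (fun a b => decide (key a < key b)) x (F ++ T)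
          = (F ++ T) ++ [x] := by
        apply PySem.List.insertBy_of_forall_not_before
        intro y _; simp [hx]
      rw [hins]
      have : (F ++ T) ++ [x] = F ++ (T ++ [x]) := by simp
      rw [this, ih F (T ++ [x]) hF (by intro y hy; rcases List.mem_append.mp hy with h | h
                                       · exact hT y h
                                       · simp at h; simp [h, hx])]
      simp [hx]
    · have hx' : key x = false := by simpa using hx
      have hins : PySem.List.insertBy (fun a b => decide (key a < key b)) x (F ++ T)
          = (F ++ [x]) ++ T := by
        cases T with
        | nil =>
          simp only [List.append_nil]
          apply PySem.List.insertBy_of_forall_not_before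
          intro y hy; simp [hx', hF y hy]
        | cons t ts =>
          rw [insertBy_mid _ _ _ _ _ (fun y hy => by simp [hx', hF y hy])
              (by simp [hx', hT t (by simp)])]
          simp
      rw [hins, ih (F ++ [x]) T (by intro y hy; rcases List.mem_append.mp hy with h | h
                                    · exact hF y h
                                    · simp at h; simp [h, hx']) hT]
      simp [hx']

-- sorted with a Bool key is exactly the stable two-block partition
lemma sorted_bool_key {α : Type} (key : α → Bool) (xs : List α) :
    PySem.List.sorted xs key false = xs.filter (fun x => !key x) ++ xs.filter key := by
  have h := foldl_insertBy_bool_key key xs [] [] (by simp) (by simp)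
  simpa [PySem.List.sorted] using h

lemma filter_eq_nil_of_not_mem (xs : List Int) (h : ¬ (0:Int) ∈ xs) :
    xs.filter (fun number => number == 0) = [] := by
  rw [List.filter_eq_nil_iff]
  intro a ha hb
  exact h (by simpa using (beq_iff_eq.mp hb ▸ ha))

theorem zeros_last_spec : Claim_equal_zeros_last := by
  intro numbers _
  unfold Spec_zeros_last zeros_last zeros_last_alt
  by_cases hmem : (0:Int) ∈ numbers
  · have hcon : numbers.contains 0 = true := by simpa using hmem
    have hne : numbers ≠ [] := by rintro rfl; simp at hmem
    have hz : numbers.filter (fun number => number == 0) ≠ [] := by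
      intro h
      have := List.filter_eq_nil_iff.mp h 0 hmem
      simp at this
    simp only [hcon, Bool.not_true, if_neg (by simp : ¬ (false = true))]
    rw [if_neg (by simpa [List.length_eq_zero_iff] using hne),
        if_neg (by simpa [List.length_eq_zero_iff] using hz)]
    rw [sorted_bool_key]
    rw [List.filter_congr (fun a _ => by by_cases h : a = 0 <;> simp [h, bne] : ∀ a ∈ numbers, ((fun x => !decide (x = 0)) a = (fun number => number != 0) a)),
        List.filter_congr (fun a _ => by by_cases h : a = 0 <;> simp [h] : ∀ a ∈ numbers, ((fun x => decide (x = 0)) a = (fun number => number == 0) a))]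
  · have hcon : numbers.contains 0 = false := by simpa using hmem
    simp only [hcon, Bool.not_false, if_true]
    by_cases hnil : numbers = []
    · subst hnil; simp [PySem.List.sorted]
    · rw [if_neg (by simpa [List.length_eq_zero_iff] using hnil),
          if_pos (by simp [filter_eq_nil_of_not_mem numbers hmem])]
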